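-- pv_equiv track=rewrite | github.com/annafr2/AI-DEVELOPER-PROJECTS | L35 - video compress FFMPEG/video_analyzer.py | analyze_gop
-- ===== SOURCE A (Python) =====
-- def analyze_gop(frames):
--     """Analyze GOP (Group of Pictures) structure."""
--     gop_sizes = []
--     current_gop = 0
--     for f in frames:
--         if f.get("key_frame") == 1:
--             if current_gop > 0:
--                 gop_sizes.append(current_gop)
--             current_gop = 1
--         else:
--             current_gop += 1
--     if current_gop > 0:
--         gop_sizes.append(current_gop)
--     return gop_sizes
-- ===== SOURCE B (Python) =====
-- def analyze_gop(frames):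
--     kf = [i for i, f in enumerate(frames) if f.get("key_frame") == 1]
--     bounds = sorted(set([0] + kf)) + [len(frames)]
--     return [b - a for a, b in zip(bounds, bounds[1:]) if b - a > 0]
-- ===== Notes on version B (the rewrite author's own statement) =====
-- stated objective: alternative
-- what changed: B collects key-frame indices, builds the sorted boundary list [0]+indices+[len], and returns consecutive positive differences, replacing A's running streak counter with flushes.
import Mathlib
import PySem

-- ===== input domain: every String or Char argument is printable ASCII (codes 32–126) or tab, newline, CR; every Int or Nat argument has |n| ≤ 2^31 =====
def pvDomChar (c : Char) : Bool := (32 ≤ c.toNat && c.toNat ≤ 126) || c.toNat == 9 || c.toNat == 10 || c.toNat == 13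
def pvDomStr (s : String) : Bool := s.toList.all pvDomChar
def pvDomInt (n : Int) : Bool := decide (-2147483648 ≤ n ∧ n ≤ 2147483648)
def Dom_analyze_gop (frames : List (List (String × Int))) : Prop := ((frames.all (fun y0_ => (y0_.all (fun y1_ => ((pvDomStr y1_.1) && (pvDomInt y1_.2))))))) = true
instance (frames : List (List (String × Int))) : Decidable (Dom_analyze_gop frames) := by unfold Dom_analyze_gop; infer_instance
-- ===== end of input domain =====

-- B replaces A's running streak counter with key-frame boundary indices and consecutive
-- differences: a different decomposition of the same linear GOP-size computation.

-- shared helper: Python's f.get("key_frame") == 1 on the frame dict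
def isKF (f : List (String × Int)) : Bool :=
  PySem.Dict.get? (PySem.Dict.mk f) "key_frame" == some 1

-- ===== PORT A =====
def analyze_gop (frames : List (List (String × Int))) : List Int :=
  let st := frames.foldl
    (fun (s : List Int × Int) f =>
      if isKF f then
        ((if s.2 > 0 then s.1 ++ [s.2] else s.1), 1)
      else
        (s.1, s.2 + 1))
    ([], 0)
  if st.2 > 0 then st.1 ++ [st.2] else st.1

-- ===== PORT B =====
def analyze_gop_alt (frames : List (List (String × Int))) : List Int :=
  let kf := (PySem.List.enumerate frames 0).filterMap
    (fun p => if isKF p.2 then some p.1 else none)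
  let bounds := PySem.List.sorted (PySem.Set.ofList ((0 : Int) :: kf)) (fun x => x) false
                  ++ [(frames.length : Int)]
  (bounds.zip (bounds.drop 1)).filterMap
    (fun p => if p.2 - p.1 > 0 then some (p.2 - p.1) else none)

-- ===== PRECONDITION & SPEC =====
def Spec_analyze_gop (frames : List (List (String × Int))) (out : List Int) : Prop := out = analyze_gop_alt frames
instance (frames : List (List (String × Int))) (out : List Int) : Decidable (Spec_analyze_gop frames out) := by unfold Spec_analyze_gop; infer_instance

-- ===== CLAIM (what is proved, stated in full; the proofs are below) =====
def Claim_equal_analyze_gop : Prop := ∀ (frames : List (List (String × Int))), Dom_analyze_gop frames → Spec_analyze_gop frames (analyze_gop frames)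

-- ===== LEMMAS AND PROOFS =====

-- A's loop, recursively: go cur fs = remaining GOP sizes given the running counter cur
def go : Int → List (List (String × Int)) → List Int
  | cur, [] => if cur > 0 then [cur] else []
  | cur, f :: rest =>
      if isKF f then (if cur > 0 then cur :: go 1 rest else go 1 rest)
      else go (cur + 1) rest

-- consecutive positive differences of a boundary list (B's zip comprehension, recursively)
def dfs : List Int → List Int
  | a :: b :: t => (if b - a > 0 then [b - a] else []) ++ dfs (b :: t)
  | _ => []

-- key-frame indices of fs, numbered from k
def kfIdx (k : Int) (fs : List (List (String × Int))) : List Int :=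
  (PySem.List.enumerate fs k).filterMap (fun p => if isKF p.2 then some p.1 else none)

lemma kfIdx_cons (k : Int) (f : List (String × Int)) (rest : List (List (String × Int))) :
    kfIdx k (f :: rest) = (if isKF f then [k] else []) ++ kfIdx (k + 1) rest := by
  simp only [kfIdx, PySem.List.enumerate_cons, List.filterMap_cons]
  split <;> simp_all

lemma foldA (fs : List (List (String × Int))) : ∀ (acc : List Int) (cur : Int),
    (let st := fs.foldl
        (fun (s : List Int × Int) f =>
          if isKF f then ((if s.2 > 0 then s.1 ++ [s.2] else s.1), 1) else (s.1, s.2 + 1))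
        (acc, cur)
     if st.2 > 0 then st.1 ++ [st.2] else st.1) = acc ++ go cur fs := by
  induction fs with
  | nil => intro acc cur; simp only [List.foldl_nil, go]; split <;> simp
  | cons f rest ih =>
      intro acc cur
      simp only [List.foldl_cons, go]
      by_cases hk : isKF f
      · rw [if_pos hk, if_pos hk]
        by_cases hc : cur > 0
        · rw [if_pos hc, if_pos hc, ih]; simp
        · rw [if_neg hc, if_neg hc, ih]
      · rw [if_neg hk, if_neg hk, ih]

lemma zipFilter (l : List Int) :
    (l.zip (l.drop 1)).filterMap (fun p => if p.2 - p.1 > 0 then some (p.2 - p.1) else none)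
      = dfs l := by
  induction l with
  | nil => simp [dfs]
  | cons a t ih =>
      cases t with
      | nil => simp [dfs]
      | cons b t' =>
          have hdr : List.drop 1 (a :: b :: t') = b :: t' := rfl
          have hdr' : List.drop 1 (b :: t') = t' := rfl
          rw [hdr, List.zip_cons_cons, List.filterMap_cons]
          rw [hdr'] at ih
          rw [show dfs (a :: b :: t') = (if b - a > 0 then [b - a] else []) ++ dfs (b :: t')
              from rfl, ← ih]
          by_cases h : b - a > 0
          · rw [if_pos h, if_pos h]; rfl
          · rw [if_neg h, if_neg h]; rfl

lemma goDfs (fs : List (List (String × Int))) : ∀ (k b : Int), b ≤ k →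
    go (k - b) fs = dfs (b :: kfIdx k fs ++ [k + (fs.length : Int)]) := by
  induction fs with
  | nil =>
      intro k b _
      have hkf : kfIdx k ([] : List (List (String × Int))) = [] := by
        simp [kfIdx, PySem.List.enumerate]
      rw [hkf]
      show (if k - b > 0 then [k - b] else []) = dfs [b, k + ((0 : Nat) : Int)]
      rw [show dfs [b, k + ((0 : Nat) : Int)] =
          (if (k + ((0 : Nat) : Int)) - b > 0 then [(k + ((0 : Nat) : Int)) - b] else []) ++ []
          from rfl]
      norm_num
  | cons f rest ih =>
      intro k b hb
      rw [kfIdx_cons]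
      by_cases hk : isKF f
      · rw [if_pos hk]
        have h1 : go 1 rest = dfs (k :: kfIdx (k + 1) rest ++ [(k + 1) + (rest.length : Int)]) := by
          simpa using ih (k + 1) k (by omega)
        have hx : k + (((f :: rest).length : Nat) : Int) = (k + 1) + (rest.length : Int) := by
          simp [List.length_cons]; ring
        rw [show go (k - b) (f :: rest) =
            (if k - b > 0 then (k - b) :: go 1 rest else go 1 rest) from by
          simp [go, hk]]
        simp only [List.cons_append, List.nil_append]
        rw [hx]
        rw [show dfs (b :: k :: (kfIdx (k + 1) rest ++ [(k + 1) + (rest.length : Int)])) =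
            (if k - b > 0 then [k - b] else []) ++
              dfs (k :: (kfIdx (k + 1) rest ++ [(k + 1) + (rest.length : Int)])) from rfl]
        rw [show k :: (kfIdx (k + 1) rest ++ [(k + 1) + (rest.length : Int)]) =
            k :: kfIdx (k + 1) rest ++ [(k + 1) + (rest.length : Int)] from by simp]
        rw [← h1]
        by_cases hc : k - b > 0
        · rw [if_pos hc, if_pos hc]; rfl
        · rw [if_neg hc, if_neg hc]; rfl
      · rw [if_neg hk]
        rw [show go (k - b) (f :: rest) = go (k - b + 1) rest from by simp [go, hk]]
        have harith : k - b + 1 = (k + 1) - b := by ring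
        rw [harith, ih (k + 1) b (by omega)]
        have hx : k + (((f :: rest).length : Nat) : Int) = (k + 1) + (rest.length : Int) := by
          simp [List.length_cons]; ring
        rw [List.nil_append, hx]

lemma kfIdx_pairwise (fs : List (List (String × Int))) (k : Int) :
    (kfIdx k fs).Pairwise (· < ·) := by
  apply List.Pairwise.filterMap _ _ (PySem.List.pairwise_lt_enumerate fs k)
  intro p q hpq x hx y hy
  split at hx
  · split at hy
    · cases hx; cases hy; exact hpq
    · cases hy
  · cases hx

lemma kfIdx_nonneg (fs : List (List (String × Int))) (x : Int) (hx : x ∈ kfIdx 0 fs) : 0 ≤ x := by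
  simp only [kfIdx, List.mem_filterMap] at hx
  obtain ⟨p, hp, hpx⟩ := hx
  rw [PySem.List.mem_enumerate_iff] at hp
  obtain ⟨j, hj, rfl⟩ := hp
  split at hpx
  · cases hpx; omega
  · cases hpx

-- the sorted-set boundary list in B is exactly 0 :: kf with a duplicated leading 0 removed
lemma bounds_eq (fs : List (List (String × Int))) :
    dfs ((0 : Int) :: kfIdx 0 fs ++ [(fs.length : Int)]) =
    dfs (PySem.List.sorted (PySem.Set.ofList ((0 : Int) :: kfIdx 0 fs)) (fun x => x) false
          ++ [(fs.length : Int)]) := by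
  have hpw := kfIdx_pairwise fs 0
  have hnn := kfIdx_nonneg fs
  cases hkf : kfIdx 0 fs with
  | nil => rfl
  | cons j rest =>
      rw [hkf] at hpw
      have hrest : ∀ x ∈ rest, j < x := (List.pairwise_cons.mp hpw).1
      by_cases hj : j = 0
      · subst hj
        have hofl : PySem.Set.ofList ((0 : Int) :: 0 :: rest) = PySem.Set.ofList ((0 : Int) :: rest) := by
          simp [PySem.Set.ofList, PySem.Set.add, PySem.Set.contains]
        have hpw' : ((0 : Int) :: rest).Pairwise (· < ·) := hpw
        have hnd : ((0 : Int) :: rest).Nodup := hpw'.nodup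
        rw [hofl, PySem.Set.ofList_eq_self_of_nodup _ hnd,
          PySem.List.sorted_eq_of_perm_of_pairwise_lt _ _ _ (List.Perm.refl _) hpw']
        simp [dfs]
      · have hjpos : 0 < j := by
          have := hnn j (by rw [hkf]; exact List.mem_cons_self)
          omega
        have hpw' : ((0 : Int) :: j :: rest).Pairwise (· < ·) := by
          refine List.pairwise_cons.mpr ⟨?_, hpw⟩
          intro x hx
          rcases List.mem_cons.mp hx with rfl | hx
          · exact hjpos
          · exact lt_trans hjpos (hrest x hx)
        rw [PySem.Set.ofList_eq_self_of_nodup _ hpw'.nodup,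
          PySem.List.sorted_eq_of_perm_of_pairwise_lt _ _ _ (List.Perm.refl _) hpw']

-- ===== VERDICT (by name: the statement is the Claim_ definition above) =====
theorem analyze_gop_spec : Claim_equal_analyze_gop := by
  intro frames _
  unfold Spec_analyze_gop analyze_gop analyze_gop_alt
  rw [foldA frames [] 0, zipFilter]
  have h0 : (0 : Int) - 0 = 0 := by ring
  have := goDfs frames 0 0 le_rfl
  rw [h0] at this
  simp only [List.nil_append]
  rw [this]
  simpa using bounds_eq frames
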